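-- pv_equiv track=rewrite | github.com/Darkduv/Project-Euler | Project Euler/Problems_100_to_119.py | tri3
-- ===== SOURCE A (Python) =====
-- def tri3(L):
--     d = len(L)
--     for i in range(d):
--         for j in range(i + 1, d):
--             for k in range(j + 1, d):
--                 for ii in range(k + 1, d):
--                     for jj in range(ii + 1, d):
--                         for kk in range(jj + 1, d):
--                             if L[i] + L[kk] + L[j] == L[k] + L[ii] + L[jj]:
--                                 return False
--                             elif L[i] + L[kk] + L[k] == L[j] + L[ii] + L[jj]:
--                                 return False
--                             elif L[i] + L[kk] + L[ii] == L[j] + L[k] + L[jj]: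
--                                 return False
--                             elif L[i] + L[kk] + L[jj] == L[j] + L[k] + L[ii]:
--                                 return False
--                             elif L[i] + L[jj] + L[j] == L[k] + L[ii] + L[kk]:
--                                 return False
--                             elif L[i] + L[jj] + L[k] == L[j] + L[ii] + L[kk]:
--                                 return False
--                             elif L[i] + L[jj] + L[ii] == L[j] + L[k] + L[kk]:
--                                 return False
--                             elif L[i] + L[ii] + L[j] == L[k] + L[jj] + L[kk]:
--                                 return False
--                             elif L[i] + L[ii] + L[k] == L[j] + L[jj] + L[kk]:
--                                 return False
--     return True
-- ===== SOURCE B (Python) =====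
-- def _compatible(t1, t2):
--     i1, j1, k1 = t1
--     i2, j2, k2 = t2
--     disjoint = (i1 != i2 and i1 != j2 and i1 != k2 and
--                 j1 != i2 and j1 != j2 and j1 != k2 and
--                 k1 != i2 and k1 != j2 and k1 != k2)
--     # disjoint and not a clean split (one triple entirely before the other)
--     return disjoint and i2 < k1 and i1 < k2
--
--
-- def tri3(L):
--     n = len(L)
--     by_sum = {}
--     # largest-index-major order: all triples inside [0..k] are seen before any triple using
--     # an index beyond k, so a witness pair is found within its smallest enclosing prefix
--     for k in range(n):
--         for j in range(k):
--             for i in range(j):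
--                 t = (i, j, k)
--                 group = by_sum.setdefault(L[i] + L[j] + L[k], [])
--                 for prev in group:
--                     if _compatible(prev, t):
--                         return False
--                 group.append(t)
--     return True
-- ===== Notes on version B (the rewrite author's own statement) =====
-- stated objective: alternative
-- what changed: Instead of scanning all 6-index windows and testing 9 hardcoded splits, B enumerates index triples once (largest-index-major), groups them by sum in a dict, and tests each new triple only against earlier same-sum triples for disjointness/non-clean-split.
import Mathlib
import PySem

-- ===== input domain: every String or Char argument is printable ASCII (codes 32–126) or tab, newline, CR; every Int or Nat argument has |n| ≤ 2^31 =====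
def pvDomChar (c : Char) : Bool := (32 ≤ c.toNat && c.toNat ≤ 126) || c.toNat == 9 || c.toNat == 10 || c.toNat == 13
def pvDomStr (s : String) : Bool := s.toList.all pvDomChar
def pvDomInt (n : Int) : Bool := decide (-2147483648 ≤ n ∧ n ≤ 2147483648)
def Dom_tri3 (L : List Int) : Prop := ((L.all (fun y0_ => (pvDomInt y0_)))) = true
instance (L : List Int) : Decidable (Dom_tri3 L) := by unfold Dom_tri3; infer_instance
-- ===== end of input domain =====

-- B enumerates index triples once, groups them by sum in a dict and tests each new triple
-- only against earlier same-sum triples for disjointness / non-clean-split, instead of A's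
-- scan of all 6-index windows with 9 hardcoded split tests; objective: alternative.

-- L[x] for an index both programs only use in range (shared subscript helper)
def pvGet (L : List Int) (x : Int) : Int := PySem.List.pyGetD L x 0

-- ===== PORT A =====
def tri3 (L : List Int) : Bool :=
  !((PySem.List.pyRange 0 (L.length : Int) 1).any fun i =>
    (PySem.List.pyRange (i+1) (L.length : Int) 1).any fun j =>
    (PySem.List.pyRange (j+1) (L.length : Int) 1).any fun k =>
    (PySem.List.pyRange (k+1) (L.length : Int) 1).any fun ii =>
    (PySem.List.pyRange (ii+1) (L.length : Int) 1).any fun jj =>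
    (PySem.List.pyRange (jj+1) (L.length : Int) 1).any fun kk =>
      (pvGet L i + pvGet L kk + pvGet L j == pvGet L k + pvGet L ii + pvGet L jj) ||
      (pvGet L i + pvGet L kk + pvGet L k == pvGet L j + pvGet L ii + pvGet L jj) ||
      (pvGet L i + pvGet L kk + pvGet L ii == pvGet L j + pvGet L k + pvGet L jj) ||
      (pvGet L i + pvGet L kk + pvGet L jj == pvGet L j + pvGet L k + pvGet L ii) ||
      (pvGet L i + pvGet L jj + pvGet L j == pvGet L k + pvGet L ii + pvGet L kk) ||
      (pvGet L i + pvGet L jj + pvGet L k == pvGet L j + pvGet L ii + pvGet L kk) ||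
      (pvGet L i + pvGet L jj + pvGet L ii == pvGet L j + pvGet L k + pvGet L kk) ||
      (pvGet L i + pvGet L ii + pvGet L j == pvGet L k + pvGet L jj + pvGet L kk) ||
      (pvGet L i + pvGet L ii + pvGet L k == pvGet L j + pvGet L jj + pvGet L kk))

-- ===== PORT B =====
-- Source B's _compatible: the two index triples are disjoint and do not form a clean split
def pvCompatible (t1 t2 : Int × Int × Int) : Bool :=
  (t1.1 != t2.1 && t1.1 != t2.2.1 && t1.1 != t2.2.2 &&
   t1.2.1 != t2.1 && t1.2.1 != t2.2.1 && t1.2.1 != t2.2.2 &&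
   t1.2.2 != t2.1 && t1.2.2 != t2.2.1 && t1.2.2 != t2.2.2) &&
  decide (t2.1 < t1.2.2) && decide (t1.1 < t2.2.2)

-- Source B's fused triple loop: each iteration checks the new triple against its sum-bucket
-- (early return on a hit), then appends it to the bucket
def pvScan : List (Int × (Int × Int × Int)) → PySem.Dict Int (List (Int × Int × Int)) → Bool
  | [], _ => true
  | (s, t) :: rest, d =>
    let group := d.getD s []
    if group.any (fun prev => pvCompatible prev t) then false
    else pvScan rest (d.insert s (group ++ [t]))

def tri3_alt (L : List Int) : Bool :=
  pvScan
    ((PySem.List.pyRange 0 (L.length : Int) 1).flatMap fun k =>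
      (PySem.List.pyRange 0 k 1).flatMap fun j =>
        (PySem.List.pyRange 0 j 1).map fun i =>
          (pvGet L i + pvGet L j + pvGet L k, (i, j, k)))
    PySem.Dict.empty

-- ===== PRECONDITION & SPEC =====
def Spec_tri3 (L : List Int) (out : Bool) : Prop := out = tri3_alt L
instance (L : List Int) (out : Bool) : Decidable (Spec_tri3 L out) := by unfold Spec_tri3; infer_instance

-- ===== CLAIM (what is proved, stated in full; the proofs are below) =====
def Claim_equal_tri3 : Prop := ∀ (L : List Int), Dom_tri3 L → Spec_tri3 L (tri3 L)

-- ===== LEMMAS AND PROOFS =====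

-- the arithmetic side conditions of "two disjoint, non-cleanly-split sorted index triples"
def pvOK (n a b c x y z : Int) : Prop :=
  0 ≤ a ∧ a < b ∧ b < c ∧ c < n ∧ 0 ≤ x ∧ x < y ∧ y < z ∧ z < n ∧
  a ≠ x ∧ a ≠ y ∧ a ≠ z ∧ b ≠ x ∧ b ≠ y ∧ b ≠ z ∧ c ≠ x ∧ c ≠ y ∧ c ≠ z ∧
  x < c ∧ a < z

-- the common mathematical content of both searches
def pvP (L : List Int) : Prop :=
  ∃ a b c x y z : Int, pvOK (L.length : Int) a b c x y z ∧
    pvGet L a + pvGet L b + pvGet L c = pvGet L x + pvGet L y + pvGet L z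

-- A's search condition, written as a proposition
def pvQA (L : List Int) : Prop :=
  ∃ i j k ii jj kk : Int,
    (0 ≤ i ∧ i < j ∧ j < k ∧ k < ii ∧ ii < jj ∧ jj < kk ∧ kk < (L.length : Int)) ∧
    (pvGet L i + pvGet L kk + pvGet L j = pvGet L k + pvGet L ii + pvGet L jj ∨
     pvGet L i + pvGet L kk + pvGet L k = pvGet L j + pvGet L ii + pvGet L jj ∨
     pvGet L i + pvGet L kk + pvGet L ii = pvGet L j + pvGet L k + pvGet L jj ∨
     pvGet L i + pvGet L kk + pvGet L jj = pvGet L j + pvGet L k + pvGet L ii ∨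
     pvGet L i + pvGet L jj + pvGet L j = pvGet L k + pvGet L ii + pvGet L kk ∨
     pvGet L i + pvGet L jj + pvGet L k = pvGet L j + pvGet L ii + pvGet L kk ∨
     pvGet L i + pvGet L jj + pvGet L ii = pvGet L j + pvGet L k + pvGet L kk ∨
     pvGet L i + pvGet L ii + pvGet L j = pvGet L k + pvGet L jj + pvGet L kk ∨
     pvGet L i + pvGet L ii + pvGet L k = pvGet L j + pvGet L jj + pvGet L kk)

-- B's triple list (largest-index-major, as generated by tri3_alt)
def pvTriples (L : List Int) : List (Int × (Int × Int × Int)) :=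
  (PySem.List.pyRange 0 (L.length : Int) 1).flatMap fun k =>
    (PySem.List.pyRange 0 k 1).flatMap fun j =>
      (PySem.List.pyRange 0 j 1).map fun i =>
        (pvGet L i + pvGet L j + pvGet L k, (i, j, k))

lemma tri3_false_iff (L : List Int) : tri3 L = false ↔ pvQA L := by
  simp only [tri3, Bool.not_eq_false', List.any_eq_true, PySem.List.mem_pyRange_one,
    Bool.or_eq_true, beq_iff_eq, or_assoc, pvQA]
  constructor
  · rintro ⟨i, ⟨hi0, _⟩, j, ⟨hj, _⟩, k, ⟨hk, _⟩, ii, ⟨hii, _⟩, jj, ⟨hjj, _⟩, kk, ⟨hkk, hkn⟩, hc⟩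
    exact ⟨i, j, k, ii, jj, kk, by omega, hc⟩
  · rintro ⟨i, j, k, ii, jj, kk, hb, hc⟩
    exact ⟨i, ⟨by omega, by omega⟩, j, ⟨by omega, by omega⟩, k, ⟨by omega, by omega⟩,
      ii, ⟨by omega, by omega⟩, jj, ⟨by omega, by omega⟩, kk, ⟨by omega, by omega⟩, hc⟩

lemma pvQA_of_sorted (L : List Int) (a b c x y z : Int)
    (h0 : 0 ≤ a) (hab : a < b) (hbc : b < c) (hcn : c < (L.length : Int))
    (hxy : x < y) (hyz : y < z) (hzn : z < (L.length : Int))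
    (hax : a < x)
    (hbx : b ≠ x) (hby : b ≠ y) (hbz : b ≠ z)
    (hcy : c ≠ y) (hcz : c ≠ z)
    (hxc : x < c)
    (hs : pvGet L a + pvGet L b + pvGet L c = pvGet L x + pvGet L y + pvGet L z) :
    pvQA L := by
  rcases lt_or_gt_of_ne hbx with hb1 | hb1
  · -- b < x : c sits strictly above x
    rcases lt_or_gt_of_ne hcy with hc1 | hc1
    · -- x < c < y : pattern {2,4} → condition 8
      exact ⟨a, b, x, c, y, z, by omega,
        Or.inr (Or.inr (Or.inr (Or.inr (Or.inr (Or.inr (Or.inr (Or.inl (by linarith))))))))⟩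
    · rcases lt_or_gt_of_ne hcz with hc2 | hc2
      · -- y < c < z : pattern {2,5} → condition 5
        exact ⟨a, b, x, y, c, z, by omega,
          Or.inr (Or.inr (Or.inr (Or.inr (Or.inl (by linarith)))))⟩
      · -- z < c : pattern {2,6} → condition 1
        exact ⟨a, b, x, y, z, c, by omega, Or.inl (by linarith)⟩
  · rcases lt_or_gt_of_ne hby with hb2 | hb2
    · -- x < b < y
      rcases lt_or_gt_of_ne hcy with hc1 | hc1
      · -- b < c < y : pattern {3,4} → condition 9
        exact ⟨a, x, b, c, y, z, by omega,
          Or.inr (Or.inr (Or.inr (Or.inr (Or.inr (Or.inr (Or.inr (Or.inr (by linarith))))))))⟩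
      · rcases lt_or_gt_of_ne hcz with hc2 | hc2
        · -- y < c < z : pattern {3,5} → condition 6
          exact ⟨a, x, b, y, c, z, by omega,
            Or.inr (Or.inr (Or.inr (Or.inr (Or.inr (Or.inl (by linarith))))))⟩
        · -- z < c : pattern {3,6} → condition 2
          exact ⟨a, x, b, y, z, c, by omega, Or.inr (Or.inl (by linarith))⟩
    · rcases lt_or_gt_of_ne hbz with hb3 | hb3
      · -- y < b < z
        rcases lt_or_gt_of_ne hcz with hc2 | hc2
        · -- b < c < z : pattern {4,5} → condition 7
          exact ⟨a, x, y, b, c, z, by omega,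
            Or.inr (Or.inr (Or.inr (Or.inr (Or.inr (Or.inr (Or.inl (by linarith)))))))⟩
        · -- z < c : pattern {4,6} → condition 3
          exact ⟨a, x, y, b, z, c, by omega, Or.inr (Or.inr (Or.inl (by linarith)))⟩
      · -- z < b < c : pattern {5,6} → condition 4
        exact ⟨a, x, y, z, b, c, by omega, Or.inr (Or.inr (Or.inr (Or.inl (by linarith))))⟩

lemma pvP_iff_pvQA (L : List Int) : pvP L ↔ pvQA L := by
  constructor
  · rintro ⟨a, b, c, x, y, z, hok, hs⟩
    obtain ⟨h0a, hab, hbc, hcn, h0x, hxy, hyz, hzn, hax, hay, haz, hbx, hby, hbz,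
      hcx, hcy, hcz, hxc, haz'⟩ := hok
    rcases lt_or_gt_of_ne hax with h1 | h1
    · exact pvQA_of_sorted L a b c x y z h0a hab hbc hcn hxy hyz hzn h1
        hbx hby hbz hcy hcz hxc hs
    · exact pvQA_of_sorted L x y z a b c h0x hxy hyz hzn hab hbc hcn h1
        (Ne.symm hay) (Ne.symm hby) (Ne.symm hcy) (Ne.symm hbz) (Ne.symm hcz) haz' hs.symm
  · rintro ⟨i, j, k, ii, jj, kk, hb, hc⟩
    obtain ⟨h0, h1, h2, h3, h4, h5, h6⟩ := hb
    rcases hc with h|h|h|h|h|h|h|h|h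
    · exact ⟨i, j, kk, k, ii, jj, by unfold pvOK; omega, by linarith⟩
    · exact ⟨i, k, kk, j, ii, jj, by unfold pvOK; omega, by linarith⟩
    · exact ⟨i, ii, kk, j, k, jj, by unfold pvOK; omega, by linarith⟩
    · exact ⟨i, jj, kk, j, k, ii, by unfold pvOK; omega, by linarith⟩
    · exact ⟨i, j, jj, k, ii, kk, by unfold pvOK; omega, by linarith⟩
    · exact ⟨i, k, jj, j, ii, kk, by unfold pvOK; omega, by linarith⟩
    · exact ⟨i, ii, jj, j, k, kk, by unfold pvOK; omega, by linarith⟩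
    · exact ⟨i, j, ii, k, jj, kk, by unfold pvOK; omega, by linarith⟩
    · exact ⟨i, k, ii, j, jj, kk, by unfold pvOK; omega, by linarith⟩

lemma mem_pvTriples (L : List Int) (p : Int × (Int × Int × Int)) :
    p ∈ pvTriples L ↔ ∃ i j k : Int,
      (0 ≤ i ∧ i < j ∧ j < k ∧ k < (L.length : Int)) ∧
      p = (pvGet L i + pvGet L j + pvGet L k, (i, j, k)) := by
  simp only [pvTriples, List.mem_flatMap, List.mem_map, PySem.List.mem_pyRange_one]
  constructor
  · rintro ⟨k, ⟨hk0, hkn⟩, j, ⟨hj0, hjk⟩, i, ⟨hi0, hij⟩, hp⟩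
    exact ⟨i, j, k, by omega, hp.symm⟩
  · rintro ⟨i, j, k, hbnd, rfl⟩
    exact ⟨k, ⟨by omega, by omega⟩, j, ⟨by omega, by omega⟩, i, ⟨by omega, by omega⟩, rfl⟩

lemma mem_bucket (l : List (Int × (Int × Int × Int))) (s : Int) (t : Int × Int × Int) :
    t ∈ (l.filter (fun p => p.1 == s)).map (fun p => p.2) ↔ (s, t) ∈ l := by
  simp only [List.mem_map, List.mem_filter, beq_iff_eq]
  constructor
  · rintro ⟨p, ⟨hp, hps⟩, rfl⟩
    have : p = (s, p.2) := by cases p; simp_all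
    rwa [this] at hp
  · intro h
    exact ⟨(s, t), ⟨h, rfl⟩, rfl⟩

lemma pvCompatible_true_iff (t1 t2 : Int × Int × Int) :
    pvCompatible t1 t2 = true ↔
      (t1.1 ≠ t2.1 ∧ t1.1 ≠ t2.2.1 ∧ t1.1 ≠ t2.2.2 ∧
       t1.2.1 ≠ t2.1 ∧ t1.2.1 ≠ t2.2.1 ∧ t1.2.1 ≠ t2.2.2 ∧
       t1.2.2 ≠ t2.1 ∧ t1.2.2 ≠ t2.2.1 ∧ t1.2.2 ≠ t2.2.2) ∧
      t2.1 < t1.2.2 ∧ t1.1 < t2.2.2 := by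
  simp [pvCompatible, bne_iff_ne, and_assoc]

lemma pvCompatible_self (t : Int × Int × Int) : pvCompatible t t = false := by
  simp [pvCompatible]

lemma pvCompatible_symm {t1 t2 : Int × Int × Int} (h : pvCompatible t1 t2 = true) :
    pvCompatible t2 t1 = true := by
  rw [pvCompatible_true_iff] at h ⊢
  obtain ⟨⟨a1, a2, a3, a4, a5, a6, a7, a8, a9⟩, b1, b2⟩ := h
  exact ⟨⟨Ne.symm a1, Ne.symm a4, Ne.symm a7, Ne.symm a2, Ne.symm a5, Ne.symm a8,
    Ne.symm a3, Ne.symm a6, Ne.symm a9⟩, b2, b1⟩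

lemma pvScan_false_iff (rest : List (Int × (Int × Int × Int))) :
    ∀ (pre : List (Int × (Int × Int × Int))) (d : PySem.Dict Int (List (Int × Int × Int))),
      (∀ s : Int, d.getD s [] = (pre.filter (fun p => p.1 == s)).map (fun p => p.2)) →
      (pvScan rest d = false ↔
        ∃ s t1 t2, ((s, t1) ∈ pre ∨ (s, t1) ∈ rest) ∧ (s, t2) ∈ rest ∧
          pvCompatible t1 t2 = true) := by
  induction rest with
  | nil => intro pre d hd; simp [pvScan]
  | cons head rest ih =>
    intro pre d hd
    obtain ⟨s, t⟩ := head
    by_cases hany : (d.getD s []).any (fun prev => pvCompatible prev t) = true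
    · simp only [pvScan, hany, if_true]
      constructor
      · intro _
        obtain ⟨t1, ht1, hc⟩ := List.any_eq_true.mp hany
        rw [hd s] at ht1
        exact ⟨s, t1, t, Or.inl ((mem_bucket pre s t1).mp ht1),
          List.mem_cons_self, hc⟩
      · intro _; trivial
    · simp only [Bool.not_eq_true] at hany
      have hstep : pvScan ((s, t) :: rest) d =
          pvScan rest (d.insert s (d.getD s [] ++ [t])) := by
        simp [pvScan, hany]
      have hd' : ∀ s' : Int, (d.insert s (d.getD s [] ++ [t])).getD s' [] =
          ((pre ++ [(s, t)]).filter (fun p => p.1 == s')).map (fun p => p.2) := by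
        intro s'
        rw [PySem.Dict.getD_insert]
        by_cases h : s' = s
        · subst h; simp [List.filter_append, hd s']
        · simp [h, List.filter_append, hd s', beq_iff_eq, Ne.symm h]
      rw [hstep, ih (pre ++ [(s, t)]) _ hd']
      constructor
      · rintro ⟨s', t1, t2, h1, h2, hc⟩
        refine ⟨s', t1, t2, ?_, List.mem_cons_of_mem _ h2, hc⟩
        rcases h1 with h1 | h1
        · rcases List.mem_append.mp h1 with h | h
          · exact Or.inl h
          · have : (s', t1) = (s, t) := by simpa using h
            exact Or.inr (this ▸ List.mem_cons_self)
        · exact Or.inr (List.mem_cons_of_mem _ h1)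
      · rintro ⟨s', t1, t2, h1, h2, hc⟩
        rcases List.mem_cons.mp h2 with h2e | h2r
        · obtain ⟨hseq, hteq⟩ := Prod.mk.injEq .. ▸ h2e
          subst hseq; subst hteq
          rcases h1 with h1 | h1
          · have hhit : (d.getD s' []).any (fun prev => pvCompatible prev t2) = true :=
              List.any_eq_true.mpr ⟨t1, by rw [hd s']; exact (mem_bucket pre s' t1).mpr h1, hc⟩
            rw [hany] at hhit
            exact absurd hhit (by simp)
          · rcases List.mem_cons.mp h1 with h1e | h1r
            · obtain ⟨_, ht1eq⟩ := Prod.mk.injEq .. ▸ h1e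
              rw [ht1eq, pvCompatible_self] at hc
              exact absurd hc (by simp)
            · exact ⟨s', t2, t1,
                Or.inl (List.mem_append.mpr (Or.inr (List.mem_singleton.mpr rfl))),
                h1r, pvCompatible_symm hc⟩
        · refine ⟨s', t1, t2, ?_, h2r, hc⟩
          rcases h1 with h1 | h1
          · exact Or.inl (List.mem_append.mpr (Or.inl h1))
          · rcases List.mem_cons.mp h1 with h1e | h1r
            · exact Or.inl (List.mem_append.mpr (Or.inr (by simp [h1e])))
            · exact Or.inr h1r

lemma alt_false_iff (L : List Int) : tri3_alt L = false ↔ pvP L := by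
  have h0 : tri3_alt L = pvScan (pvTriples L) PySem.Dict.empty := rfl
  rw [h0, pvScan_false_iff (pvTriples L) [] PySem.Dict.empty
    (by intro s; simp [PySem.Dict.getD_empty])]
  simp only [List.not_mem_nil, false_or]
  constructor
  · rintro ⟨s, t1, t2, h1, h2, hc⟩
    obtain ⟨a, b, c, hbnd1, heq1⟩ := (mem_pvTriples L _).mp h1
    obtain ⟨x, y, z, hbnd2, heq2⟩ := (mem_pvTriples L _).mp h2
    rw [Prod.mk.injEq] at heq1 heq2
    obtain ⟨hs1, htr1⟩ := heq1
    obtain ⟨hs2, htr2⟩ := heq2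
    rw [htr1, htr2] at hc
    obtain ⟨⟨d1, d2, d3, d4, d5, d6, d7, d8, d9⟩, hnc1, hnc2⟩ :=
      (pvCompatible_true_iff _ _).mp hc
    exact ⟨a, b, c, x, y, z, by unfold pvOK; simp_all, by rw [← hs1, ← hs2]⟩
  · rintro ⟨a, b, c, x, y, z, hok, hs⟩
    obtain ⟨h0a, hab, hbc, hcn, h0x, hxy, hyz, hzn, hax, hay, haz, hbx, hby, hbz,
      hcx, hcy, hcz, hxc, haz'⟩ := hok
    refine ⟨pvGet L a + pvGet L b + pvGet L c, (a, b, c), (x, y, z),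
      (mem_pvTriples L _).mpr ⟨a, b, c, by omega, rfl⟩,
      (mem_pvTriples L _).mpr ⟨x, y, z, by omega, by rw [hs]⟩, ?_⟩
    exact (pvCompatible_true_iff _ _).mpr
      ⟨by simp_all, by simpa using hxc, by simpa using haz'⟩

-- ===== VERDICT (by name: the statement is the Claim_ definition above) =====
theorem tri3_spec : Claim_equal_tri3 := by
  intro L _
  unfold Spec_tri3
  have h1 := tri3_false_iff L
  have h2 := (alt_false_iff L)
  rw [pvP_iff_pvQA] at h2
  cases ha : tri3 L <;> cases hb : tri3_alt L <;> simp_all
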